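-- pv_equiv track=rewrite | github.com/beerbank3/Programmers-Python | 프로그래머스/0/181890. 왼쪽 오른쪽/왼쪽 오른쪽.py | solution
-- ===== SOURCE A (Python) =====
-- def solution(str_list):
--     answer = []
--     for index, str in enumerate(str_list):
--         if str == 'l':
--             answer = str_list[0:index]
--             break
--         elif str == 'r':
--             answer = str_list[index+1:]
--             break
--     return answer
-- ===== SOURCE B (Python) =====
-- def solution(str_list):
--     n = len(str_list)
--     li = str_list.index('l') if 'l' in str_list else n
--     ri = str_list.index('r') if 'r' in str_list else n
--     if li == n and ri == n:
--         return []
--     if li < ri: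
--         return str_list[:li]
--     return str_list[ri + 1:]
-- ===== Notes on version B (the rewrite author's own statement) =====
-- stated objective: alternative
-- what changed: Replaces A's single enumerate loop with break by two independent first-occurrence searches (list.index for 'l' and 'r', absence mapped to len) followed by one index comparison that picks the prefix or suffix.
import Mathlib
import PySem

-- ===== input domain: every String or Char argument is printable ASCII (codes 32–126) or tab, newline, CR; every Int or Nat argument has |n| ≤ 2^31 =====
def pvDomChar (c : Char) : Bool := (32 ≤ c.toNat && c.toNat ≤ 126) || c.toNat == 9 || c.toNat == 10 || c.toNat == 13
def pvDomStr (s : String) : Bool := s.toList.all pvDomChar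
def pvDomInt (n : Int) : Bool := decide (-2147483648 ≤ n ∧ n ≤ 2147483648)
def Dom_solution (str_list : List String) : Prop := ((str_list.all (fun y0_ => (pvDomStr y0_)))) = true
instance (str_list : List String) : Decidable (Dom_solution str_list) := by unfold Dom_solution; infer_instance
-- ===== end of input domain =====

-- B replaces A's break-loop by two independent index searches and one comparison (alternative decomposition, same cost).

-- ===== PORT A =====
-- the enumerate loop with break: structural recursion over the remaining list, carrying the running index
def solutionGo (full : List String) (rest : List String) (i : Nat) : List String :=
  match rest with
  | [] => []
  | s :: t =>
    if s = "l" then PySem.List.slice full (some 0) (some (i : Int))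
    else if s = "r" then PySem.List.slice full (some ((i : Int) + 1)) none
    else solutionGo full t (i + 1)

def solution (str_list : List String) : List String :=
  solutionGo str_list str_list 0

-- ===== PORT B =====
def solution_alt (str_list : List String) : List String :=
  let n := str_list.length
  let li := match PySem.List.index? str_list "l" with | some i => i | none => n
  let ri := match PySem.List.index? str_list "r" with | some i => i | none => n
  if li = n ∧ ri = n then []
  else if li < ri then str_list.take li
  else str_list.drop (ri + 1)

-- ===== PRECONDITION & SPEC =====
def Spec_solution (str_list : List String) (out : List String) : Prop := out = solution_alt str_list
instance (str_list : List String) (out : List String) : Decidable (Spec_solution str_list out) := by unfold Spec_solution; infer_instance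

-- ===== CLAIM (what is proved, stated in full; the proofs are below) =====
def Claim_equal_solution : Prop := ∀ (str_list : List String), Dom_solution str_list → Spec_solution str_list (solution str_list)

-- ===== LEMMAS AND PROOFS =====

theorem index?_append_not_mem {α : Type} [DecidableEq α] (pref rest : List α) (v : α)
    (h : v ∉ pref) :
    PySem.List.index? (pref ++ rest) v = (PySem.List.index? rest v).map (· + pref.length) := by
  induction pref with
  | nil => simp [Option.map_id']
  | cons p ps ih =>
    have hp : p ≠ v := fun hpv => h (by simp [hpv])
    have hps : v ∉ ps := fun hv => h (by simp [hv])
    rw [List.cons_append, PySem.List.index?_cons_of_ne _ hp, ih hps, Option.map_map]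
    cases PySem.List.index? rest v <;> simp

-- explicit form of solution_alt given values of the two searches
theorem alt_char (xs : List String) (li ri : Nat)
    (hli : (match PySem.List.index? xs "l" with | some i => i | none => xs.length) = li)
    (hri : (match PySem.List.index? xs "r" with | some i => i | none => xs.length) = ri) :
    solution_alt xs =
      if li = xs.length ∧ ri = xs.length then []
      else if li < ri then xs.take li else xs.drop (ri + 1) := by
  simp only [solution_alt, hli, hri]

theorem go_eq (rest pref : List String) (hl : "l" ∉ pref) (hr : "r" ∉ pref) :
    solutionGo (pref ++ rest) rest pref.length = solution_alt (pref ++ rest) := by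
  induction rest generalizing pref with
  | nil =>
    rw [alt_char _ pref.length pref.length
      (by rw [List.append_nil, (PySem.List.index?_eq_none_iff pref "l").mpr hl])
      (by rw [List.append_nil, (PySem.List.index?_eq_none_iff pref "r").mpr hr])]
    simp [solutionGo]
  | cons s t ih =>
    have hfl : (pref ++ s :: t).length = pref.length + 1 + t.length := by simp; omega
    by_cases hsl : s = "l"
    · subst hsl
      have hli : PySem.List.index? (pref ++ "l" :: t) "l" = some pref.length := by
        rw [index?_append_not_mem _ _ _ hl, PySem.List.index?_cons_self]; simp
      have hri := index?_append_not_mem pref ("l" :: t) "r" hr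
      rw [PySem.List.index?_cons_of_ne _ (by decide)] at hri
      have hL : solutionGo (pref ++ "l" :: t) ("l" :: t) pref.length = pref := by
        show (if ("l" : String) = "l" then
            PySem.List.slice (pref ++ "l" :: t) (some 0) (some (pref.length : Int))
          else if ("l" : String) = "r" then
            PySem.List.slice (pref ++ "l" :: t) (some ((pref.length : Int) + 1)) none
          else solutionGo (pref ++ "l" :: t) t (pref.length + 1)) = pref
        rw [if_pos rfl, PySem.List.slice_zero_start, PySem.List.slice_to_natCast,
          List.take_left]
      rw [hL]
      cases hrt : PySem.List.index? t "r" with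
      | none =>
        rw [hrt] at hri; simp only [Option.map_none] at hri
        rw [alt_char _ pref.length (pref ++ "l" :: t).length (by rw [hli]) (by rw [hri])]
        rw [if_neg (by rw [hfl]; omega), if_pos (by rw [hfl]; omega),
          List.take_left]
      | some k =>
        rw [hrt] at hri; simp only [Option.map_some] at hri
        rw [alt_char _ pref.length (k + 1 + pref.length) (by rw [hli]) (by rw [hri])]
        rw [if_neg (by rw [hfl]; omega), if_pos (by omega),
          List.take_left]
    · by_cases hsr : s = "r"
      · subst hsr
        have hri : PySem.List.index? (pref ++ "r" :: t) "r" = some pref.length := by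
          rw [index?_append_not_mem _ _ _ hr, PySem.List.index?_cons_self]; simp
        have hli := index?_append_not_mem pref ("r" :: t) "l" hl
        rw [PySem.List.index?_cons_of_ne _ (by decide)] at hli
        have hdr : (pref ++ "r" :: t).drop (pref.length + 1) = t := by
          rw [show pref ++ "r" :: t = (pref ++ ["r"]) ++ t by simp,
            show pref.length + 1 = (pref ++ ["r"]).length by simp]
          exact List.drop_left
        have hL : solutionGo (pref ++ "r" :: t) ("r" :: t) pref.length = t := by
          show (if ("r" : String) = "l" then
              PySem.List.slice (pref ++ "r" :: t) (some 0) (some (pref.length : Int))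
            else if ("r" : String) = "r" then
              PySem.List.slice (pref ++ "r" :: t) (some ((pref.length : Int) + 1)) none
            else solutionGo (pref ++ "r" :: t) t (pref.length + 1)) = t
          rw [if_neg (by decide), if_pos rfl, PySem.List.slice_from _ (by omega)]
          rw [show ((pref.length : Int) + 1).toNat = pref.length + 1 by omega, hdr]
        rw [hL]
        cases hlt : PySem.List.index? t "l" with
        | none =>
          rw [hlt] at hli; simp only [Option.map_none] at hli
          rw [alt_char _ (pref ++ "r" :: t).length pref.length (by rw [hli]) (by rw [hri])]
          rw [if_neg (by rw [hfl]; omega), if_neg (by rw [hfl]; omega), hdr]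
        | some k =>
          rw [hlt] at hli; simp only [Option.map_some] at hli
          rw [alt_char _ (k + 1 + pref.length) pref.length (by rw [hli]) (by rw [hri])]
          have hk : k < t.length := (PySem.List.getElem_of_index?_eq_some hlt).choose
          rw [if_neg (by rw [hfl]; omega), if_neg (by omega), hdr]
      · have hL : solutionGo (pref ++ s :: t) (s :: t) pref.length
            = solutionGo (pref ++ s :: t) t (pref.length + 1) := by
          show (if s = "l" then _ else if s = "r" then _ else _) = _
          rw [if_neg hsl, if_neg hsr]
        rw [hL, show pref ++ s :: t = (pref ++ [s]) ++ t by simp,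
          show pref.length + 1 = (pref ++ [s]).length by simp]
        exact ih (pref ++ [s]) (by simp; tauto) (by simp; tauto)

-- ===== VERDICT (by name: the statement is the Claim_ definition above) =====
theorem solution_spec : Claim_equal_solution := by
  intro str_list _
  unfold Spec_solution solution
  have := go_eq str_list [] (by simp) (by simp)
  simpa using this
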